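-- pv_equiv track=rewrite | github.com/vishnu-png/DSA03-NLP | NLP PROGRAMS/DAY 5/10.py | transform_tags
-- ===== SOURCE A (Python) =====
-- def transform_tags(tokens):
--     tags = ["NOUN"] * len(tokens)
--
--     # Rule 1: exact word 'to' -> 'PRT' (particle)
--     for i, w in enumerate(tokens):
--         if w.lower() == "to":
--             tags[i] = "PRT"
--
--     # Rule 2: words ending with 'ing' -> VBG
--     for i, w in enumerate(tokens):
--         if w.lower().endswith("ing"):
--             tags[i] = "VBG"
--
--     # Rule 3: word after 'the' -> NOUN
--     for i in range(len(tokens)-1):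
--         if tokens[i].lower() == "the":
--             tags[i+1] = "NOUN"
--
--     return list(zip(tokens, tags))
-- ===== SOURCE B (Python) =====
-- def transform_tags(tokens):
--     # Single pass tracking the previous (lowercased) token; the final tag is
--     # decided at once with precedence inverse to A's pass order.
--     result = []
--     prev = None
--     for w in tokens:
--         wl = w.lower()
--         if prev == "the":
--             tag = "NOUN"
--         elif wl.endswith("ing"):
--             tag = "VBG"
--         elif wl == "to":
--             tag = "PRT"
--         else:
--             tag = "NOUN"
--         result.append((w, tag))
--         prev = wl
--     return result
-- ===== Notes on version B (the rewrite author's own statement) =====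
-- stated objective: simpler
-- what changed: Replaces three full passes of in-place overwrites on a tags array (plus a final zip) by one pass that tracks the previous lowercased token and decides each final tag directly with the inverse precedence.
import Mathlib
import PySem

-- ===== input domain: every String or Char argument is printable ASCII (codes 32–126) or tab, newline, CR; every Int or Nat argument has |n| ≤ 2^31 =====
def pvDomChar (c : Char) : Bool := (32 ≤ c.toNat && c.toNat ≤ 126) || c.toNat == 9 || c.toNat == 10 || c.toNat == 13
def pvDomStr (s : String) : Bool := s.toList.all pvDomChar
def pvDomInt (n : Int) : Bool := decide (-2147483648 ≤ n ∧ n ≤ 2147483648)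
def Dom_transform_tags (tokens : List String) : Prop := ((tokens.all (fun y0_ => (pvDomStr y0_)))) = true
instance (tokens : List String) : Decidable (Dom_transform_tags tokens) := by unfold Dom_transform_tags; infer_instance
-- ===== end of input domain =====

-- B replaces A's three overwrite passes on a tags array by one pass tracking the previous lowercased token (simpler decomposition, same O(n) cost).

-- ===== PORT A =====
-- Three passes of in-place updates on a tags list, then zip.  Indices produced
-- by enumerate / range are nonnegative and in range here, so `.toNat` on them
-- and `pyGetD … ""` are exact ports of tags[i] = … / tokens[i].
def transform_tags (tokens : List String) : List (String × String) :=
  let tags := List.replicate tokens.length "NOUN"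
  -- Rule 1: exact word 'to' -> 'PRT'
  let tags := (PySem.List.enumerate tokens).foldl
    (fun tg iw => if PySem.Str.lower iw.2 = "to" then tg.set iw.1.toNat "PRT" else tg) tags
  -- Rule 2: words ending with 'ing' -> VBG
  let tags := (PySem.List.enumerate tokens).foldl
    (fun tg iw => if PySem.Str.endswith (PySem.Str.lower iw.2) "ing" then tg.set iw.1.toNat "VBG" else tg) tags
  -- Rule 3: word after 'the' -> NOUN
  let tags := (PySem.List.pyRange 0 ((tokens.length : Int) - 1) 1).foldl
    (fun tg i => if PySem.Str.lower (PySem.List.pyGetD tokens i "") = "the" then tg.set (i + 1).toNat "NOUN" else tg) tags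
  tokens.zip tags

-- ===== PORT B =====
-- single loop carrying the previous lowercased token (none before the first element)
def transformTagsLoop (prev : Option String) (ws : List String) : List (String × String) :=
  match ws with
  | [] => []
  | w :: rest =>
    let wl := PySem.Str.lower w
    let tag :=
      if prev = some "the" then "NOUN"
      else if PySem.Str.endswith wl "ing" then "VBG"
      else if wl = "to" then "PRT"
      else "NOUN"
    (w, tag) :: transformTagsLoop (some wl) rest

def transform_tags_alt (tokens : List String) : List (String × String) :=
  transformTagsLoop none tokens

-- ===== PRECONDITION & SPEC =====
def Spec_transform_tags (tokens : List String) (out : List (String × String)) : Prop := out = transform_tags_alt tokens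
instance (tokens : List String) (out : List (String × String)) : Decidable (Spec_transform_tags tokens out) := by unfold Spec_transform_tags; infer_instance

-- ===== CLAIM (what is proved, stated in full; the proofs are below) =====
def Claim_equal_transform_tags : Prop := ∀ (tokens : List String), Dom_transform_tags tokens → Spec_transform_tags tokens (transform_tags tokens)

-- ===== LEMMAS AND PROOFS =====

theorem getElem?_set_map {α : Type} (l : List α) (i j : Nat) (a : α) :
    (l.set i a)[j]? = if i = j then l[j]?.map (fun _ => a) else l[j]? := by
  rw [List.getElem?_set]
  split
  · rename_i h; subst h
    rcases h : l[i]? with _ | v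
    · have := List.getElem?_eq_none_iff.mp h
      simp [if_neg (by omega : ¬ i < l.length)]
    · obtain ⟨hl, -⟩ := List.getElem?_eq_some_iff.mp h
      simp [if_pos hl]
  · rfl

-- one overwrite pass (rules 1 and 2), pointwise
theorem pass_getElem? (p : String → Prop) [DecidablePred p] (v : String) :
    ∀ (xs : List String) (s : Int), 0 ≤ s → ∀ (tg : List String) (j : Nat),
    ((PySem.List.enumerate xs s).foldl
        (fun tg iw => if p iw.2 then tg.set iw.1.toNat v else tg) tg)[j]?
      = if s.toNat ≤ j ∧ xs[j - s.toNat]?.any (fun w => decide (p w)) then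
          tg[j]?.map (fun _ => v)
        else tg[j]? := by
  intro xs
  induction xs with
  | nil => intro s hs tg j; simp [PySem.List.enumerate_nil]
  | cons x rest ih =>
    intro s hs tg j
    rw [PySem.List.enumerate_cons, List.foldl_cons, ih (s + 1) (by omega)]
    dsimp only
    rcases Nat.lt_trichotomy j s.toNat with hlt | heq | hgt
    · -- j strictly before this element: untouched on both sides
      have e1 : ¬((s + 1).toNat ≤ j ∧ rest[j - (s + 1).toNat]?.any (fun w => decide (p w)) = true) :=
        fun h => absurd h.1 (by omega)
      have e2 : ¬(s.toNat ≤ j ∧ (x :: rest)[j - s.toNat]?.any (fun w => decide (p w)) = true) :=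
        fun h => absurd h.1 (by omega)
      rw [if_neg e1, if_neg e2]
      by_cases hp : p x
      · rw [if_pos hp, getElem?_set_map, if_neg (show ¬ s.toNat = j by omega)]
      · rw [if_neg hp]
    · -- j is exactly this element's index
      have e1 : ¬((s + 1).toNat ≤ j ∧ rest[j - (s + 1).toNat]?.any (fun w => decide (p w)) = true) :=
        fun h => absurd h.1 (by omega)
      rw [if_neg e1]
      have h0 : j - s.toNat = 0 := by omega
      rw [h0]
      simp only [List.getElem?_cons_zero, Option.any_some]
      by_cases hp : p x
      · rw [if_pos hp, getElem?_set_map, if_pos (by omega : s.toNat = j),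
          if_pos ⟨by omega, by simp [hp]⟩]
      · rw [if_neg hp, if_neg (by rintro ⟨-, h⟩; simp [hp] at h)]
    · -- j strictly after this element: head irrelevant
      have h2 : j - (s + 1).toNat = j - s.toNat - 1 := by omega
      have h3 : (x :: rest)[j - s.toNat]? = rest[j - s.toNat - 1]? := by
        rcases Nat.exists_eq_add_of_lt hgt with ⟨k, hk⟩
        have hjs : j - s.toNat = k + 1 := by omega
        simp [hjs]
      rw [h2, h3]
      have htg : (if p x then tg.set s.toNat v else tg)[j]? = tg[j]? := by
        by_cases hp : p x
        · rw [if_pos hp, getElem?_set_map, if_neg (show ¬ s.toNat = j by omega)]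
        · rw [if_neg hp]
      rw [htg]
      by_cases hc : rest[j - s.toNat - 1]?.any (fun w => decide (p w)) = true
      · rw [if_pos ⟨by omega, hc⟩, if_pos ⟨by omega, hc⟩]
      · rw [if_neg (by rintro ⟨-, h⟩; exact hc h), if_neg (by rintro ⟨-, h⟩; exact hc h)]

-- Rule-3 pass over range(len(tokens)-1), pointwise
theorem pass3_getElem? (tokens : List String) :
    ∀ (a : Int), 0 ≤ a → ∀ (tg : List String) (j : Nat),
    ((PySem.List.pyRange a ((tokens.length : Int) - 1) 1).foldl
        (fun tg i => if PySem.Str.lower (PySem.List.pyGetD tokens i "") = "the" then tg.set (i + 1).toNat "NOUN" else tg) tg)[j]?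
      = if a + 1 ≤ (j : Int) ∧ (j : Int) ≤ (tokens.length : Int) - 1 ∧
            PySem.Str.lower (PySem.List.pyGetD tokens ((j : Int) - 1) "") = "the" then
          tg[j]?.map (fun _ => "NOUN")
        else tg[j]? := by
  intro a
  induction hm : ((tokens.length : Int) - 1 - a).toNat generalizing a with
  | zero =>
    intro ha tg j
    rw [PySem.List.pyRange_one_eq_nil (by omega), List.foldl_nil,
      if_neg (by rintro ⟨h1, h2, -⟩; omega)]
  | succ m ih =>
    intro ha tg j
    rw [PySem.List.pyRange_one_cons (by omega), List.foldl_cons,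
      ih (a + 1) (by omega) (by omega)]
    rcases Int.lt_trichotomy (j : Int) (a + 1) with hlt | heq | hgt
    · have e1 : ¬(a + 1 + 1 ≤ (j : Int) ∧ (j : Int) ≤ (tokens.length : Int) - 1 ∧
            PySem.Str.lower (PySem.List.pyGetD tokens ((j : Int) - 1) "") = "the") :=
        fun h => absurd h.1 (by omega)
      have e2 : ¬(a + 1 ≤ (j : Int) ∧ (j : Int) ≤ (tokens.length : Int) - 1 ∧
            PySem.Str.lower (PySem.List.pyGetD tokens ((j : Int) - 1) "") = "the") :=
        fun h => absurd h.1 (by omega)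
      rw [if_neg e1, if_neg e2]
      by_cases hp : PySem.Str.lower (PySem.List.pyGetD tokens a "") = "the"
      · rw [if_pos hp, getElem?_set_map, if_neg (show ¬ (a + 1).toNat = j by omega)]
      · rw [if_neg hp]
    · have e1 : ¬(a + 1 + 1 ≤ (j : Int) ∧ (j : Int) ≤ (tokens.length : Int) - 1 ∧
            PySem.Str.lower (PySem.List.pyGetD tokens ((j : Int) - 1) "") = "the") :=
        fun h => absurd h.1 (by omega)
      rw [if_neg e1]
      have hja : ((j : Int)) - 1 = a := by omega
      by_cases hp : PySem.Str.lower (PySem.List.pyGetD tokens a "") = "the"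
      · rw [if_pos hp, getElem?_set_map, if_pos (by omega : (a + 1).toNat = j),
          if_pos ⟨by omega, by omega, by rw [hja]; exact hp⟩]
      · rw [if_neg hp, if_neg (by rintro ⟨-, -, h⟩; rw [hja] at h; exact hp h)]
    · have htg : (if PySem.Str.lower (PySem.List.pyGetD tokens a "") = "the" then
            tg.set (a + 1).toNat "NOUN" else tg)[j]? = tg[j]? := by
        by_cases hp : PySem.Str.lower (PySem.List.pyGetD tokens a "") = "the"
        · rw [if_pos hp, getElem?_set_map, if_neg (show ¬ (a + 1).toNat = j by omega)]
        · rw [if_neg hp]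
      rw [htg]
      by_cases hc : (j : Int) ≤ (tokens.length : Int) - 1 ∧
          PySem.Str.lower (PySem.List.pyGetD tokens ((j : Int) - 1) "") = "the"
      · rw [if_pos ⟨by omega, hc.1, hc.2⟩, if_pos ⟨by omega, hc.1, hc.2⟩]
      · rw [if_neg (by rintro ⟨-, h1, h2⟩; exact hc ⟨h1, h2⟩),
          if_neg (by rintro ⟨-, h1, h2⟩; exact hc ⟨h1, h2⟩)]

-- B's loop, pointwise
theorem altLoop_getElem? :
    ∀ (xs : List String) (prev : Option String) (j : Nat),
    (transformTagsLoop prev xs)[j]?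
      = xs[j]?.map (fun w =>
          (w, if (if j = 0 then prev else xs[j-1]?.map PySem.Str.lower) = some "the" then "NOUN"
              else if PySem.Str.endswith (PySem.Str.lower w) "ing" then "VBG"
              else if PySem.Str.lower w = "to" then "PRT"
              else "NOUN")) := by
  intro xs
  induction xs with
  | nil => intro prev j; simp [transformTagsLoop]
  | cons w rest ih =>
    intro prev j
    cases j with
    | zero => simp [transformTagsLoop]
    | succ k =>
      rw [transformTagsLoop]
      simp only [List.getElem?_cons_succ, ih (some (PySem.Str.lower w)) k]
      cases k with
      | zero => simp
      | succ m => simp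

theorem zip_getElem? {α β : Type} (l1 : List α) (l2 : List β) (i : Nat) :
    (l1.zip l2)[i]? = l1[i]?.bind (fun a => l2[i]?.map (fun b => (a, b))) := by
  induction l1 generalizing l2 i with
  | nil => simp
  | cons a l ih => cases l2 <;> cases i <;> simp [ih]

-- ===== VERDICT (by name: the statement is the Claim_ definition above) =====
theorem transform_tags_spec : Claim_equal_transform_tags := by
  intro tokens _
  show tokens.zip _ = transformTagsLoop none tokens
  apply List.ext_getElem?
  intro j
  rw [zip_getElem?,
    pass3_getElem? tokens 0 le_rfl,
    pass_getElem? (fun w => PySem.Str.endswith (PySem.Str.lower w) "ing" = true) "VBG" tokens 0 le_rfl,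
    pass_getElem? (fun w => PySem.Str.lower w = "to") "PRT" tokens 0 le_rfl,
    altLoop_getElem? tokens none j]
  rcases hw : tokens[j]? with _ | w
  · simp
  obtain ⟨hj, hwj⟩ := List.getElem?_eq_some_iff.mp hw
  simp only [Int.toNat_zero, Nat.zero_le, Nat.sub_zero, hw, true_and, Option.any_some,
    List.getElem?_replicate, if_pos hj, Option.bind_some]
  have hj1 : j - 1 < tokens.length := by omega
  have hgd : 1 ≤ j → PySem.List.pyGetD tokens ((j : Int) - 1) "" = tokens[j - 1]'hj1 := by
    intro h1
    rw [show ((j : Int) - 1) = ((j - 1 : Nat) : Int) by omega]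
    simp [List.getD_eq_getElem?_getD, List.getElem?_eq_getElem hj1]
  have hprev : tokens[j - 1]? = some (tokens[j - 1]'hj1) := List.getElem?_eq_getElem hj1
  simp only [decide_eq_true_eq]
  by_cases h0 : j = 0
  · rw [if_pos h0, if_neg (by rintro ⟨h, -⟩; omega)]
    simp only [Option.map_some, reduceCtorEq, if_false]
    split_ifs <;> rfl
  · have h1 : 1 ≤ j := by omega
    rw [if_neg h0, hprev, Option.map_some]
    by_cases hthe : PySem.Str.lower (tokens[j - 1]'hj1) = "the"
    · rw [if_pos ⟨by omega, by omega, by rw [hgd h1]; exact hthe⟩]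
      simp only [Option.map_some, Option.some.injEq, if_pos hthe]
      split_ifs <;> rfl
    · rw [if_neg (by rintro ⟨-, -, h⟩; rw [hgd h1] at h; exact hthe h)]
      simp only [Option.map_some, Option.some.injEq, if_neg hthe]
      split_ifs <;> rfl
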